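-- pv_equiv track=rewrite | github.com/Isaac9902/demo2 | pipeline/retrieve_similar_projects.py | extract_fragments
-- ===== SOURCE A (Python) =====
-- def normalize_text(text: str) -> str:
--     """Normalize text for simple rule matching."""
--     if text is None:
--         return ""
--     return str(text).strip().lower()
--
-- def extract_fragments(raw_customer_text: str) -> list[str]:
--     """Extract simple fragments from customer text."""
--     separators = "，。；：、,.!?！？;:\n\r\t()（）/ "
--     text = raw_customer_text
--     for separator in separators:
--         text = text.replace(separator, "|")
--
--     fragments: list[str] = []
--     seen: set[str] = set()
--     for part in text.split("|"):
--         fragment = normalize_text(part)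
--         if len(fragment) < 2 or fragment in seen:
--             continue
--         seen.add(fragment)
--         fragments.append(fragment)
--     return fragments
-- ===== SOURCE B (Python) =====
-- def normalize_text(text: str) -> str:
--     """Normalize text for simple rule matching."""
--     if text is None:
--         return ""
--     return str(text).strip().lower()
--
--
-- def extract_fragments(raw_customer_text: str) -> list[str]:
--     """Single pass: split on any separator char (incl. '|') while deduping."""
--     sep_chars = set("，。；：、,.!?！？;:\n\r\t()（）/ ") | {"|"}
--     fragments: list[str] = []
--     seen: set[str] = set()
--     current: list[str] = []
--     for ch in raw_customer_text + "|":  # trailing sentinel flushes the last buffer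
--         if ch in sep_chars:
--             fragment = normalize_text("".join(current))
--             current = []
--             if len(fragment) >= 2 and fragment not in seen:
--                 seen.add(fragment)
--                 fragments.append(fragment)
--         else:
--             current.append(ch)
--     return fragments
-- ===== Notes on version B (the rewrite author's own statement) =====
-- stated objective: alternative
-- what changed: Instead of 22 whole-string replace passes followed by a split and a dedup loop over the pieces, B makes a single fused pass over the text, buffering characters and flushing a fragment at each separator (or a trailing sentinel) with the same normalize/len/seen logic.
import Mathlib
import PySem

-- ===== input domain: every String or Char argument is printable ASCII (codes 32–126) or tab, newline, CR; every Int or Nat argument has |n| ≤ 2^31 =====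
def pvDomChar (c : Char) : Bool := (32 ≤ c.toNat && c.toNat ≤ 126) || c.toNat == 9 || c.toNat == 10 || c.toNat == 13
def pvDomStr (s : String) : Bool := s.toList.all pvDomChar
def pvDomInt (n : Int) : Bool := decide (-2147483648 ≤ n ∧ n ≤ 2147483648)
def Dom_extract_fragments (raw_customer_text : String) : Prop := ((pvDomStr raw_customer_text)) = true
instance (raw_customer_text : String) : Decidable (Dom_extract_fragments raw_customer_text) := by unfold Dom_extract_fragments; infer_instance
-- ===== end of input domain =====

-- B replaces A's 22 whole-string replace passes + split with one fused char scan (objective: alternative decomposition, same results).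

-- ===== PORT A =====
-- helper normalize_text (shared by both Python files verbatim): str input is never None.
def normalize_text (text : String) : String :=
  PySem.Str.lower (PySem.Str.strip text)

def extract_fragments (raw_customer_text : String) : List String :=
  let separators : List Char := "，。；：、,.!?！？;:\n\r\t()（）/ ".toList
  let text : String :=
    separators.foldl (fun t sep => PySem.Str.replace t (String.ofList [sep]) "|") raw_customer_text
  -- text.split("|"): sep ≠ "", the total splitOn form
  let parts : List String := (PySem.Chars.splitOn text.toList ['|']).map String.ofList
  (parts.foldl (fun (st : List String × PySem.Set String) part =>
      let fragment := normalize_text part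
      if PySem.Str.len fragment < 2 ∨ fragment ∈ st.2 then st
      else (st.1 ++ [fragment], st.2.add fragment))
    ([], PySem.Set.ofList [])).1

-- ===== PORT B =====
-- flush the current buffer: normalize, then keep it iff len ≥ 2 and unseen
def pvFlush (cur : List Char) (st : List String × PySem.Set String) :
    List String × PySem.Set String :=
  let fragment := normalize_text (String.ofList cur)
  if PySem.Str.len fragment < 2 ∨ fragment ∈ st.2 then st
  else (st.1 ++ [fragment], st.2.add fragment)

def pvSepB : PySem.Set Char :=
  (PySem.Set.ofList "，。；：、,.!?！？;:\n\r\t()（）/ ".toList).add '|'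

def pvScan (cs : List Char) (cur : List Char) (st : List String × PySem.Set String) :
    List String :=
  match cs with
  | [] => st.1
  | c :: rest =>
      if c ∈ pvSepB then pvScan rest [] (pvFlush cur st)
      else pvScan rest (cur ++ [c]) st

def extract_fragments_alt (raw_customer_text : String) : List String :=
  pvScan (raw_customer_text.toList ++ ['|']) [] ([], PySem.Set.ofList [])

-- ===== PRECONDITION & SPEC =====
def Spec_extract_fragments (raw_customer_text : String) (out : List String) : Prop := out = extract_fragments_alt raw_customer_text
instance (raw_customer_text : String) (out : List String) : Decidable (Spec_extract_fragments raw_customer_text out) := by unfold Spec_extract_fragments; infer_instance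

-- ===== CLAIM (what is proved, stated in full; the proofs are below) =====
def Claim_equal_extract_fragments : Prop := ∀ (raw_customer_text : String), Dom_extract_fragments raw_customer_text → Spec_extract_fragments raw_customer_text (extract_fragments raw_customer_text)

-- ===== LEMMAS AND PROOFS =====

theorem pv_modifyHead_id {α : Type} (l : List α) :
    List.modifyHead (fun h => h) l = l := by cases l <;> rfl

-- the character substitution the chain of replaces amounts to
def pvSubst (c : Char) : Char :=
  if c ∈ "，。；：、,.!?！？;:\n\r\t()（）/ ".toList then '|' else c

-- clean recursive form of splitting on '|'
def pvSplit : List Char → List (List Char)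
  | [] => [[]]
  | c :: t => if c = '|' then [] :: pvSplit t else (pvSplit t).modifyHead (c :: ·)

theorem pvSplit_cons_pipe (l : List Char) : pvSplit ('|' :: l) = [] :: pvSplit l := by
  rw [show pvSplit ('|' :: l)
        = if '|' = '|' then [] :: pvSplit l else (pvSplit l).modifyHead ('|' :: ·) from rfl,
      if_pos rfl]

theorem pvSplit_cons_ne (c : Char) (l : List Char) (h : ¬ c = '|') :
    pvSplit (c :: l) = (pvSplit l).modifyHead (c :: ·) := by
  rw [show pvSplit (c :: l)
        = if c = '|' then [] :: pvSplit l else (pvSplit l).modifyHead (c :: ·) from rfl,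
      if_neg h]

theorem pv_replace_go (a b : Char) (l acc : List Char) (fuel : Nat)
    (h : l.length ≤ fuel) :
    PySem.Chars.replace.go [a] [b] fuel l acc
      = acc.reverse ++ l.map (fun c => if c = a then b else c) := by
  induction l generalizing fuel acc with
  | nil => cases fuel <;> simp [PySem.Chars.replace.go]
  | cons c t ih =>
    cases fuel with
    | zero => simp at h
    | succ n =>
      simp only [PySem.Chars.replace.go, List.isPrefixOf]
      by_cases hca : a = c
      · subst hca
        simp only [BEq.rfl, Bool.true_and, if_pos]
        rw [show List.drop (List.length [a]) (a :: t) = t from rfl]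
        rw [ih _ _ (by simpa using h)]
        simp
      · rw [if_neg (by simp [hca])]
        rw [ih _ _ (by simpa using h)]
        simp [Ne.symm hca]

theorem pv_replace_one (a b : Char) (l : List Char) :
    PySem.Chars.replace l [a] [b] = l.map (fun c => if c = a then b else c) := by
  simp [PySem.Chars.replace, pv_replace_go a b l [] l.length le_rfl]

-- the string-level replace chain, pushed to lists
theorem pv_chain_toList (gs : List Char) (s : String) :
    (gs.foldl (fun t sep => PySem.Str.replace t (String.ofList [sep]) "|") s).toList
      = gs.foldl (fun l a => PySem.Chars.replace l [a] ['|']) s.toList := by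
  induction gs generalizing s with
  | nil => rfl
  | cons g t ih =>
    simp only [List.foldl_cons]
    rw [ih, PySem.Str.toList_replace]
    congr 1 <;> simp

theorem pv_pointwise_notmem (gs : List Char) (c : Char) (h : c ∉ gs) :
    gs.foldl (fun x a => if x = a then '|' else x) c = c := by
  induction gs with
  | nil => rfl
  | cons g t ih =>
    simp only [List.mem_cons, not_or] at h
    simp only [List.foldl_cons, if_neg h.1]
    exact ih h.2

theorem pv_pointwise_mem (gs : List Char) (c : Char) (hc : c ∈ gs) (hb : '|' ∉ gs) :
    gs.foldl (fun x a => if x = a then '|' else x) c = '|' := by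
  induction gs with
  | nil => simp at hc
  | cons g t ih =>
    simp only [List.mem_cons, not_or] at hb
    simp only [List.foldl_cons]
    by_cases hcg : c = g
    · rw [if_pos hcg]
      exact pv_pointwise_notmem t '|' hb.2
    · rw [if_neg hcg]
      exact ih ((List.mem_cons.mp hc).resolve_left hcg) hb.2

set_option maxHeartbeats 2000000 in
theorem pv_chain_eq_map (s : String) :
    (("，。；：、,.!?！？;:\n\r\t()（）/ ".toList).foldl
        (fun t sep => PySem.Str.replace t (String.ofList [sep]) "|") s).toList
      = s.toList.map pvSubst := by
  rw [pv_chain_toList]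
  have hfold : ∀ (gs l : List Char),
      gs.foldl (fun l a => PySem.Chars.replace l [a] ['|']) l
        = l.map (fun c => gs.foldl (fun x a => if x = a then '|' else x) c) := by
    intro gs
    induction gs with
    | nil => intro l; simp
    | cons g t ih =>
      intro l
      rw [List.foldl_cons, ih, pv_replace_one, List.map_map]
      rfl
  rw [hfold]
  apply List.map_congr_left
  intro c _
  unfold pvSubst
  by_cases h : c ∈ "，。；：、,.!?！？;:\n\r\t()（）/ ".toList
  · rw [if_pos h, pv_pointwise_mem _ _ h (by decide)]
  · rw [if_neg h, pv_pointwise_notmem _ _ h]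

theorem pv_splitOn_go (l cur : List Char) (acc : List (List Char)) (fuel : Nat)
    (h : l.length + 1 ≤ fuel) :
    PySem.Chars.splitOn.go ['|'] fuel l cur acc
      = acc.reverse ++ (pvSplit l).modifyHead (fun h => cur.reverse ++ h) := by
  induction l generalizing fuel cur acc with
  | nil =>
    cases fuel with
    | zero => simp at h
    | succ n => simp [PySem.Chars.splitOn.go, pvSplit]
  | cons c t ih =>
    cases fuel with
    | zero => simp at h
    | succ n =>
      simp only [PySem.Chars.splitOn.go, List.isPrefixOf]
      by_cases hc : c = '|'
      · subst hc
        simp only [BEq.rfl, Bool.true_and, if_true]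
        rw [show List.drop (List.length ['|']) ('|' :: t) = t from rfl]
        rw [ih _ _ _ (by simpa using h)]
        rw [show pvSplit ('|' :: t) = [] :: pvSplit t from by rw [pvSplit, if_pos rfl]]
        rw [show List.modifyHead (fun h => List.reverse ([] : List Char) ++ h) (pvSplit t)
              = pvSplit t from pv_modifyHead_id _]
        simp
      · rw [if_neg (by simp [Ne.symm hc])]
        rw [ih _ _ _ (by simpa using h)]
        simp only [pvSplit, if_neg hc, List.modifyHead_modifyHead]
        rw [show ((fun h => cur.reverse ++ h) ∘ fun x => c :: x)
              = (fun h => (c :: cur).reverse ++ h) by funext x; simp]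

theorem pv_splitOn_eq (l : List Char) :
    PySem.Chars.splitOn l ['|'] = pvSplit l := by
  rw [PySem.Chars.splitOn, pv_splitOn_go l [] [] (l.length + 1) le_rfl]
  simp only [List.reverse_nil, List.nil_append]
  exact pv_modifyHead_id _

theorem pv_mem_sepB (c : Char) : c ∈ pvSepB ↔ pvSubst c = '|' := by
  unfold pvSepB pvSubst
  rw [PySem.Set.mem_add, PySem.Set.mem_ofList]
  by_cases h : c ∈ "，。；：、,.!?！？;:\n\r\t()（）/ ".toList
  · rw [if_pos h]
    exact ⟨fun _ => rfl, fun _ => Or.inl h⟩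
  · rw [if_neg h]
    exact ⟨fun hm => hm.resolve_left h, Or.inr⟩

set_option maxHeartbeats 2000000 in
theorem pv_main (l cur : List Char) (st : List String × PySem.Set String) :
    pvScan (l ++ ['|']) cur st
      = (List.foldl (fun s p => pvFlush p s) st
          ((pvSplit (l.map pvSubst)).modifyHead (cur ++ ·))).1 := by
  induction l generalizing cur st with
  | nil =>
    have hpipe : '|' ∈ pvSepB := (pv_mem_sepB '|').mpr (by unfold pvSubst; split_ifs <;> rfl)
    rw [show pvScan ([] ++ ['|']) cur st
          = if '|' ∈ pvSepB then pvScan [] [] (pvFlush cur st) else pvScan [] (cur ++ ['|']) st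
        from rfl, if_pos hpipe]
    rw [show pvScan ([] : List Char) [] (pvFlush cur st) = (pvFlush cur st).1 from rfl]
    rw [show pvSplit (List.map pvSubst []) = [[]] from rfl]
    rw [show List.modifyHead (fun x => cur ++ x) [([] : List Char)] = [cur ++ []] from rfl]
    rw [List.append_nil, List.foldl_cons, List.foldl_nil]
  | cons c t ih =>
    by_cases hc : pvSubst c = '|'
    · have hmem : c ∈ pvSepB := (pv_mem_sepB c).mpr hc
      rw [List.cons_append,
          show pvScan (c :: (t ++ ['|'])) cur st
            = if c ∈ pvSepB then pvScan (t ++ ['|']) [] (pvFlush cur st)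
              else pvScan (t ++ ['|']) (cur ++ [c]) st from rfl,
          if_pos hmem, ih,
          show List.modifyHead (fun x => [] ++ x) (pvSplit (List.map pvSubst t))
            = pvSplit (List.map pvSubst t) from pv_modifyHead_id _,
          List.map_cons, hc, pvSplit_cons_pipe,
          show List.modifyHead (fun x => cur ++ x) ([] :: pvSplit (List.map pvSubst t))
            = (cur ++ []) :: pvSplit (List.map pvSubst t) from rfl,
          List.append_nil, List.foldl_cons]
    · have hmem : c ∉ pvSepB := fun h => hc ((pv_mem_sepB c).mp h)
      have hcc : pvSubst c = c := by
        unfold pvSubst at hc ⊢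
        split_ifs at hc ⊢ with h
        · exact absurd rfl hc
        · rfl
      have hcn : ¬ c = '|' := by rw [← hcc]; exact hc
      rw [List.cons_append,
          show pvScan (c :: (t ++ ['|'])) cur st
            = if c ∈ pvSepB then pvScan (t ++ ['|']) [] (pvFlush cur st)
              else pvScan (t ++ ['|']) (cur ++ [c]) st from rfl,
          if_neg hmem, ih,
          List.map_cons, hcc, pvSplit_cons_ne c _ hcn, List.modifyHead_modifyHead,
          show ((fun x => cur ++ x) ∘ fun x => c :: x) = (fun x => cur ++ [c] ++ x) from by
            funext x; simp]

-- ===== VERDICT (by name: the statement is the Claim_ definition above) =====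
set_option maxHeartbeats 2000000 in
theorem extract_fragments_spec : Claim_equal_extract_fragments := by
  intro raw _
  unfold Spec_extract_fragments extract_fragments extract_fragments_alt
  dsimp only
  rw [List.foldl_map, pv_chain_eq_map, pv_splitOn_eq, pv_main]
  rw [show (List.modifyHead (fun x => [] ++ x) (pvSplit (raw.toList.map pvSubst)))
        = pvSplit (raw.toList.map pvSubst) from pv_modifyHead_id _]
  rfl
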